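-- pv_equiv track=rewrite | github.com/pypi-data/pypi-mirror-391 | packages/arthexis/arthexis-0.1.32-py3-none-any.whl/core/models.py | reverse_uid
-- ===== SOURCE A (Python) =====
-- def reverse_uid(value: str) -> str:
--     """Return ``value`` with reversed byte order for reference storage."""
--
--     normalized = "".join((value or "").split()).upper()
--     if not normalized:
--         return ""
--     if len(normalized) % 2 != 0:
--         return normalized[::-1]
--     bytes_list = [normalized[index : index + 2] for index in range(0, len(normalized), 2)]
--     bytes_list.reverse()
--     return "".join(bytes_list)
-- ===== SOURCE B (Python) =====
-- def reverse_uid(value: str) -> str: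
--     """Return ``value`` with reversed byte order for reference storage."""
--
--     normalized = "".join(c.upper() for c in (value or "") if not c.isspace())
--     if not normalized:
--         return ""
--     if len(normalized) % 2 != 0:
--         return normalized[::-1]
--     out = ""
--     rest = normalized
--     while rest:
--         out = rest[:2] + out
--         rest = rest[2:]
--     return out
-- ===== Notes on version B (the rewrite author's own statement) =====
-- stated objective: alternative
-- what changed: Normalization becomes a single filter/upper pass over characters instead of split/join/upper, and the even-length branch prepends each 2-char chunk to an accumulator in one forward pass instead of building a chunk list, reversing it and joining.
import Mathlib
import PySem

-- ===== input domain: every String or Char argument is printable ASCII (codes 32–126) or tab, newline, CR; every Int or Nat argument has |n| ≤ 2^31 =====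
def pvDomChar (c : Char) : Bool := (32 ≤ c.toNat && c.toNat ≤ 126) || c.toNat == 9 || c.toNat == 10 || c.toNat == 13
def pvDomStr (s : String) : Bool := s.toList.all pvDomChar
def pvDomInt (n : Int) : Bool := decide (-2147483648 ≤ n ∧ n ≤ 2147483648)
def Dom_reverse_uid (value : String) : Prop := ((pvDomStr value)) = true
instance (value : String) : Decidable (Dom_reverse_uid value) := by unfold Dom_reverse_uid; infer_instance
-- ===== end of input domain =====

-- B re-implements A with a single filter/upper normalization pass and an accumulator
-- loop prepending 2-char chunks (instead of split/join/upper and chunk-list + reverse + join);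
-- same return value, proved equal on all inputs.

-- ===== PORT A =====
def reverse_uid (value : String) : String :=
  let normalized := PySem.Str.upper (PySem.Str.join "" (PySem.Str.split₀ value))
  if normalized = "" then ""
  else if PySem.Int.mod (PySem.Str.len normalized) 2 ≠ 0 then
    (PySem.Str.slice? normalized none none (-1)).getD ""
  else
    let bytes_list := (PySem.List.pyRange 0 (PySem.Str.len normalized) 2).map
      (fun index => PySem.Str.slice normalized (some index) (some (index + 2)))
    PySem.Str.join "" bytes_list.reverse

-- ===== PORT B =====
-- the 'while rest: out = rest[:2] + out; rest = rest[2:]' loop of Source B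
def pvPairLoop (rest out : List Char) : List Char :=
  match rest with
  | [] => out
  | [a] => a :: out
  | a :: b :: rest' => pvPairLoop rest' (a :: b :: out)

def reverse_uid_alt (value : String) : String :=
  let normalized : List Char :=
    (value.toList.filter (fun c => !PySem.Chars.isspace c)).map PySem.Chars.upperChar
  if normalized = [] then ""
  else if PySem.Int.mod (normalized.length : Int) 2 ≠ 0 then
    String.ofList normalized.reverse
  else
    String.ofList (pvPairLoop normalized [])

-- ===== PRECONDITION & SPEC =====
def Spec_reverse_uid (value : String) (out : String) : Prop := out = reverse_uid_alt value
instance (value : String) (out : String) : Decidable (Spec_reverse_uid value out) := by unfold Spec_reverse_uid; infer_instance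

-- ===== CLAIM (what is proved, stated in full; the proofs are below) =====
def Claim_equal_reverse_uid : Prop := ∀ (value : String), Dom_reverse_uid value → Spec_reverse_uid value (reverse_uid value)

-- ===== LEMMAS AND PROOFS =====

-- joining with the empty separator is flatten
theorem pv_join_nil (parts : List (List Char)) :
    PySem.Chars.join [] parts = parts.flatten := by
  induction parts with
  | nil => simp [PySem.Chars.join, List.intercalate]
  | cons p ps ih =>
    cases ps with
    | nil => simp [PySem.Chars.join, List.intercalate]
    | cons q qs =>
      simp only [PySem.Chars.join, List.intercalate] at *
      simp [List.intersperse] at *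
      simpa using ih

-- invariant of split₀'s worker: flattening its output recovers the non-space characters
theorem pv_go_flatten (rest : List Char) : ∀ (cur : List Char) (acc : List (List Char)),
    (PySem.Chars.split₀.go rest cur acc).flatten
      = acc.reverse.flatten ++ cur.reverse ++ rest.filter (fun c => !PySem.Chars.isspace c) := by
  induction rest with
  | nil =>
    intro cur acc
    simp only [PySem.Chars.split₀.go]
    by_cases h : cur.isEmpty
    · simp [List.isEmpty_iff.mp h]
    · simp [h]
  | cons c rest ih =>
    intro cur acc
    simp only [PySem.Chars.split₀.go]
    by_cases hs : PySem.Chars.isspace c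
    · by_cases hc : cur.isEmpty
      · simp [hs, ih, List.isEmpty_iff.mp hc]
      · simp [hs, hc, ih]
    · simp [hs, ih]

-- A's normalization equals B's single filter/map pass
theorem pv_norm_eq (l : List Char) :
    PySem.Chars.upper (PySem.Chars.join [] (PySem.Chars.split₀ l))
      = (l.filter (fun c => !PySem.Chars.isspace c)).map PySem.Chars.upperChar := by
  have h : (PySem.Chars.split₀ l).flatten = l.filter (fun c => !PySem.Chars.isspace c) := by
    simpa using pv_go_flatten l [] []
  rw [pv_join_nil, h, PySem.Chars.upper]

-- A's pair-chunking, described structurally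
def pvChunk2 : List Char → List (List Char)
  | [] => []
  | [a] => [[a]]
  | a :: b :: r => [a, b] :: pvChunk2 r

theorem pv_range_map_chunks (cs : List Char) :
    (PySem.List.pyRange 0 (cs.length : Int) 2).map
        (fun i => PySem.List.slice cs (some i) (some (i + 2))) = pvChunk2 cs := by
  induction cs using pvChunk2.induct with
  | case1 => simp [PySem.List.pyRange_of_pos 0 0 (s := 2) (by norm_num), pvChunk2]
  | case2 a =>
    have h1 : (([a] : List Char).length : Int) = 1 := by simp
    rw [h1, PySem.List.pyRange_of_pos 0 1 (s := 2) (by norm_num)]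
    norm_num [pvChunk2]
    rfl
  | case3 a b r ih =>
    have hlen : ((a :: b :: r).length : Int) = (r.length : Int) + 2 := by simp; ring
    rw [hlen]
    rw [PySem.List.pyRange_of_pos 0 ((r.length : Int) + 2) (s := 2) (by norm_num)]
    have hcnt : (if (0:Int) < (r.length : Int) + 2 then ((((r.length : Int) + 2) - 0 + 2 - 1) / 2).toNat else 0)
        = (if (0:Int) < (r.length : Int) then (((r.length : Int) - 0 + 2 - 1) / 2).toNat else 0) + 1 := by
      by_cases hr : (0:Int) < (r.length : Int)
      · simp only [if_pos (by omega : (0:Int) < (r.length : Int) + 2), if_pos hr]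
        omega
      · have hr0 : (r.length : Int) = 0 := by omega
        simp [hr0]
    rw [hcnt, List.range_succ_eq_map]
    simp only [List.map_cons, List.map_map]
    rw [pvChunk2]
    refine List.cons_eq_cons.mpr ⟨rfl, ?_⟩
    rw [← ih, PySem.List.pyRange_of_pos 0 (r.length : Int) (s := 2) (by norm_num), List.map_map]
    apply List.map_congr_left
    intro k _
    show PySem.List.slice (a :: b :: r) (some (0 + 2 * (↑(k + 1)))) (some (0 + 2 * (↑(k + 1)) + 2))
        = PySem.List.slice r (some (0 + 2 * (k : Int))) (some (0 + 2 * (k : Int) + 2))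
    rw [PySem.List.slice_toNat _ (by positivity) (by positivity),
        PySem.List.slice_toNat _ (by positivity) (by positivity)]
    have h1 : ((0:Int) + 2 * (↑(k + 1) : Int)).toNat = 2 * k + 2 := by push_cast; omega
    have h2 : ((0:Int) + 2 * (↑(k + 1) : Int) + 2).toNat = 2 * k + 4 := by push_cast; omega
    have h3 : ((0:Int) + 2 * (k : Int)).toNat = 2 * k := by omega
    have h4 : ((0:Int) + 2 * (k : Int) + 2).toNat = 2 * k + 2 := by omega
    rw [h1, h2, h3, h4]
    have hdrop : List.drop (2 * k + 2) (a :: b :: r) = List.drop (2 * k) r := by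
      have : 2 * k + 2 = (2 * k + 1) + 1 := by omega
      rw [this, List.drop_succ_cons, List.drop_succ_cons]
    rw [hdrop]
    congr 1
    omega

-- B's loop equals flattening A's reversed chunk list
theorem pv_loop_eq (cs : List Char) : ∀ (out : List Char),
    pvPairLoop cs out = ((pvChunk2 cs).reverse).flatten ++ out := by
  induction cs using pvChunk2.induct with
  | case1 => intro out; simp [pvPairLoop, pvChunk2]
  | case2 a => intro out; simp [pvPairLoop, pvChunk2]
  | case3 a b r ih =>
    intro out
    simp only [pvPairLoop, pvChunk2, List.reverse_cons, List.flatten_append, ih]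
    simp

-- ===== VERDICT (by name: the statement is the Claim_ definition above) =====
theorem reverse_uid_spec : Claim_equal_reverse_uid := by
  intro value _
  simp only [Spec_reverse_uid, reverse_uid, reverse_uid_alt]
  set nB : List Char :=
    (value.toList.filter (fun c => !PySem.Chars.isspace c)).map PySem.Chars.upperChar with hnB
  have hA : (PySem.Str.upper (PySem.Str.join "" (PySem.Str.split₀ value))).toList = nB := by
    rw [PySem.Str.toList_upper, PySem.Str.toList_join]
    have : ("" : String).toList = [] := rfl
    rw [this, PySem.Str.split₀_map_toList, pv_norm_eq]
  set nA := PySem.Str.upper (PySem.Str.join "" (PySem.Str.split₀ value)) with hnA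
  have hempty : (nA = "") ↔ nB = [] := by
    rw [← hA]; exact String.toList_inj.symm.trans (by simp)
  have hlen : PySem.Str.len nA = (nB.length : Int) := by
    rw [PySem.Str.len_eq, hA]
  by_cases h0 : nB = []
  · simp [hempty.mpr h0, h0]
  · rw [if_neg (fun h => h0 (hempty.mp h)), if_neg h0, hlen]
    by_cases hodd : PySem.Int.mod (nB.length : Int) 2 ≠ 0
    · rw [if_pos hodd, if_pos hodd, PySem.Str.slice?_none_none_neg_one, Option.getD_some, hA]
    · rw [if_neg hodd, if_neg hodd]
      apply String.toList_inj.mp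
      rw [PySem.Str.toList_join, String.toList_ofList]
      have hmap : (((PySem.List.pyRange 0 ((nB.length : Int)) 2).map
            (fun index => PySem.Str.slice nA (some index) (some (index + 2)))).reverse).map String.toList
          = (pvChunk2 nB).reverse := by
        rw [List.map_reverse, List.map_map]
        refine congrArg List.reverse ?_
        rw [← pv_range_map_chunks nB]
        apply List.map_congr_left
        intro i _
        show (PySem.Str.slice nA (some i) (some (i + 2))).toList = _
        rw [PySem.Str.toList_slice, PySem.Chars.slice, hA]
      rw [hmap, pv_join_nil, pv_loop_eq, List.append_nil, String.toList_ofList]
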